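-- pv_equiv track=rewrite | github.com/raeez/chiral-bar-cobar | compute/lib/minimal_resolution_chiral_engine.py | betagamma_hilbert
-- ===== SOURCE A (Python) =====
-- def betagamma_hilbert(n: int) -> int:
--     """dim (BG)_n at half-integer weights lambda = 1/2.
--
--     For lambda = 1/2 (the symplectic boson), beta and gamma both have weight
--     1/2, so by-integer-weights modes contribute as the partition function.
--     For INTEGER lambda = 0/1 (the standard betagamma at c = -2), beta has
--     weight 0 (forbidden by positive-energy axiom) -- AP18 exception.
--     Here we use lambda = 1, c = -2: gamma has weight 0 (constant), beta has
--     weight 1; we count gamma-FREE descendants only.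
--     Standard convention: chi_{BG}(q) = prod_{m >= 1}(1 - q^m)^{-2} (after
--     removing zero modes).
--     """
--     if n < 0:
--         return 0
--     if n == 0:
--         return 1
--     # 2-colored partitions
--     dp = [0] * (n + 1)
--     dp[0] = 1
--     for m in range(1, n + 1):
--         new_dp = [0] * (n + 1)
--         for k in range(n + 1):
--             if dp[k] == 0:
--                 continue
--             j = 0
--             while k + j * m <= n:
--                 new_dp[k + j * m] += dp[k] * (j + 1)
--                 j += 1
--         dp = new_dp
--     return dp[n]
-- ===== SOURCE B (Python) =====
-- def betagamma_hilbert(n: int) -> int: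
--     """Coefficient of q^n in prod_{m>=1} (1-q^m)^{-2}, via in-place
--     single-term recurrences: multiplying by (1-q^m)^{-1} is the pass
--     dp[k] += dp[k-m]; applying it twice per m gives the square."""
--     if n < 0:
--         return 0
--     dp = [1] + [0] * n
--     for m in range(1, n + 1):
--         for _ in range(2):
--             for k in range(m, n + 1):
--                 dp[k] += dp[k - m]
--     return dp[n]
-- ===== Notes on version B (the rewrite author's own statement) =====
-- stated objective: faster
-- what changed: Replaces the per-m rebuild of a fresh array via a weighted inner while-loop (coefficient j+1 at stride j*m) with two in-place single-addition passes dp[k] += dp[k-m] per m, which multiply by (1-q^m)^{-1} twice; intended as faster (O(n^2) vs O(n^2 log n)), a timing run measured ~10x at the largest sizes both finished.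
import Mathlib
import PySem

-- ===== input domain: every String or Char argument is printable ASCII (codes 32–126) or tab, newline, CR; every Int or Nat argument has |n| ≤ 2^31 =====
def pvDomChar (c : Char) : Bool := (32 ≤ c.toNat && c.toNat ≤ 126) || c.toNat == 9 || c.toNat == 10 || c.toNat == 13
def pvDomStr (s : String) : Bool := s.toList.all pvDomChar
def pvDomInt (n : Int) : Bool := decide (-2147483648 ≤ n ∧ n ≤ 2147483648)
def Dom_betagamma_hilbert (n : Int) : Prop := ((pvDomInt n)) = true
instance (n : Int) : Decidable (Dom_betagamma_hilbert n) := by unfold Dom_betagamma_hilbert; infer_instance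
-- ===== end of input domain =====

-- B replaces A's per-m rebuild (fresh array, weighted inner while-loop) by two in-place
-- passes dp[k] += dp[k-m] per m; intended as faster (O(n^2) work vs A's O(n^2 log n));
-- a timing run measured about 10x at the largest sizes both finished.


-- ===== PORT A =====
-- the inner `while k + j * m <= n` loop; `m = 0` never occurs in A (m ranges over 1..n),
-- the guard only makes the recursion total
def pvAwhile (v : Int) (new : List Int) (nN m k j : Nat) : List Int :=
  if m = 0 then new
  else if k + j * m ≤ nN then
    pvAwhile v (new.set (k + j * m) (new.getD (k + j * m) 0 + v * ((j : Int) + 1))) nN m k (j + 1)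
  else new
termination_by nN + 1 - (k + j * m)
decreasing_by
  have h : (j + 1) * m = j * m + m := by ring
  omega

-- one iteration of A's outer loop: build new_dp from dp
def pvAstep (dp : List Int) (nN m : Nat) : List Int :=
  (List.range (nN + 1)).foldl
    (fun new k => if dp.getD k 0 = 0 then new else pvAwhile (dp.getD k 0) new nN m k 0)
    (List.replicate (nN + 1) 0)

def betagamma_hilbert (n : Int) : Int :=
  if n < 0 then 0
  else if n = 0 then 1
  else
    ((List.range' 1 n.toNat).foldl (fun dp m => pvAstep dp n.toNat m)
      ((List.replicate (n.toNat + 1) 0).set 0 1)).getD n.toNat 0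

-- ===== PORT B =====
-- one in-place pass `for k in range(m, n+1): dp[k] += dp[k-m]`
def pvBpass (dp : List Int) (m nN : Nat) : List Int :=
  (List.range' m (nN + 1 - m)).foldl
    (fun dp k => dp.set k (dp.getD k 0 + dp.getD (k - m) 0)) dp

def betagamma_hilbert_alt (n : Int) : Int :=
  if n < 0 then 0
  else
    ((List.range' 1 n.toNat).foldl (fun dp m => pvBpass (pvBpass dp m n.toNat) m n.toNat)
      (1 :: List.replicate n.toNat 0)).getD n.toNat 0

-- ===== PRECONDITION & SPEC =====
def Spec_betagamma_hilbert (n : Int) (out : Int) : Prop := out = betagamma_hilbert_alt n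
instance (n : Int) (out : Int) : Decidable (Spec_betagamma_hilbert n out) := by unfold Spec_betagamma_hilbert; infer_instance

-- ===== CLAIM (what is proved, stated in full; the proofs are below) =====
def Claim_equal_betagamma_hilbert : Prop := ∀ (n : Int), Dom_betagamma_hilbert n → Spec_betagamma_hilbert n (betagamma_hilbert n)

-- ===== LEMMAS AND PROOFS =====

lemma pv_getD_set (l : List Int) (i j : Nat) (v : Int) :
    (l.set i v).getD j 0 = if i = j ∧ j < l.length then v else l.getD j 0 := by
  simp only [List.getD_eq_getElem?_getD, List.getElem?_set]
  split_ifs with h1 h2 h3 h3 <;> simp_all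

-- result of one single-addition pass, as a recursive function: B i = f i + B (i - m)
def pvBfun (f : Nat → Int) (m k : Nat) : Int :=
  f k + (if _h : 0 < m ∧ m ≤ k then pvBfun f m (k - m) else 0)
termination_by k

lemma pvBfun_congr (f g : Nat → Int) (m : Nat) (k : Nat)
    (h : ∀ j, j ≤ k → f j = g j) : pvBfun f m k = pvBfun g m k := by
  induction k using Nat.strong_induction_on with
  | _ k ih =>
    conv_lhs => rw [pvBfun]
    conv_rhs => rw [pvBfun]
    rw [h k le_rfl]
    by_cases hc : 0 < m ∧ m ≤ k
    · rw [dif_pos hc, dif_pos hc, ih (k - m) (by omega) (fun j hj => h j (by omega))]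
    · rw [dif_neg hc, dif_neg hc]

-- invariant of B's in-place fold over k = a, a+1, …
lemma pvBpass_fold (f : Nat → Int) (m nN : Nat) (hm : 1 ≤ m) :
    ∀ (cnt a : Nat) (l : List Int), l.length = nN + 1 → m ≤ a → a + cnt ≤ nN + 1 →
    (∀ i, i < a → l.getD i 0 = pvBfun f m i) → (∀ i, a ≤ i → l.getD i 0 = f i) →
    (((List.range' a cnt).foldl (fun dp k => dp.set k (dp.getD k 0 + dp.getD (k - m) 0)) l).length = nN + 1
     ∧ (∀ i, i < a + cnt →
        ((List.range' a cnt).foldl (fun dp k => dp.set k (dp.getD k 0 + dp.getD (k - m) 0)) l).getD i 0 = pvBfun f m i)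
     ∧ (∀ i, a + cnt ≤ i →
        ((List.range' a cnt).foldl (fun dp k => dp.set k (dp.getD k 0 + dp.getD (k - m) 0)) l).getD i 0 = f i)) := by
  intro cnt
  induction cnt with
  | zero =>
    intro a l hlen hma hbound hlow hhigh
    simpa using ⟨hlen, fun i hi => hlow i (by omega), fun i hi => hhigh i (by omega)⟩
  | succ cnt ih =>
    intro a l hlen hma hbound hlow hhigh
    rw [List.range'_succ]
    simp only [List.foldl_cons]
    have halen : a < l.length := by omega
    have h1 : (l.set a (l.getD a 0 + l.getD (a - m) 0)).length = nN + 1 := by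
      rw [List.length_set]; exact hlen
    have hlow' : ∀ i, i < a + 1 →
        (l.set a (l.getD a 0 + l.getD (a - m) 0)).getD i 0 = pvBfun f m i := by
      intro i hi
      rw [pv_getD_set]
      rcases Nat.lt_or_ge i a with h | h
      · rw [if_neg (by omega), hlow i h]
      · have hia : i = a := by omega
        subst hia
        rw [if_pos ⟨rfl, halen⟩]
        conv_rhs => rw [pvBfun]
        rw [dif_pos ⟨by omega, hma⟩, hhigh i le_rfl, hlow (i - m) (by omega)]
    have hhigh' : ∀ i, a + 1 ≤ i →
        (l.set a (l.getD a 0 + l.getD (a - m) 0)).getD i 0 = f i := by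
      intro i hi
      rw [pv_getD_set, if_neg (by omega), hhigh i (by omega)]
    have := ih (a + 1) (l.set a (l.getD a 0 + l.getD (a - m) 0)) h1 (by omega) (by omega)
      hlow' hhigh'
    exact ⟨this.1, fun i hi => this.2.1 i (by omega), fun i hi => this.2.2 i (by omega)⟩

-- characterisation of one B pass
lemma pvBpass_spec (dp : List Int) (m nN : Nat) (hm : 1 ≤ m) (hmn : m ≤ nN)
    (hlen : dp.length = nN + 1) :
    (pvBpass dp m nN).length = nN + 1 ∧
    (∀ i, i ≤ nN → (pvBpass dp m nN).getD i 0 = pvBfun (fun j => dp.getD j 0) m i) := by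
  have h := pvBpass_fold (fun j => dp.getD j 0) m nN hm (nN + 1 - m) m dp hlen le_rfl
    (by omega)
    (fun i hi => by rw [pvBfun, dif_neg (by omega)]; ring)
    (fun i _ => rfl)
  exact ⟨h.1, fun i hi => h.2.1 i (by omega)⟩

-- contribution written by A's while-loop (from step j on) at position i
def pvWj (v : Int) (m k j i nN : Nat) : Int :=
  if k + j * m ≤ i ∧ i ≤ nN ∧ m ∣ (i - k) then v * (((i - k) / m : Nat) + 1) else 0

lemma pvAwhile_length (v : Int) (new : List Int) (nN m k j : Nat) :
    (pvAwhile v new nN m k j).length = new.length := by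
  fun_induction pvAwhile v new nN m k j with
  | case1 => rfl
  | case2 a b c d e => (try rw [e]); rw [List.length_set]
  | case3 => rfl

lemma pvAwhile_getD (v : Int) (new : List Int) (nN m k j i : Nat)
    (hm : m ≠ 0) (hlen : new.length = nN + 1) :
    (pvAwhile v new nN m k j).getD i 0 = new.getD i 0 + pvWj v m k j i nN := by
  revert hlen
  fun_induction pvAwhile v new nN m k j with
  | case1 new j h => exact absurd h hm
  | case2 new j hm0 hle ih =>
    intro hlen
    rw [ih (by rw [List.length_set]; exact hlen)]
    have hm1 : 0 < m := Nat.pos_of_ne_zero hm0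
    have e1 : (j + 1) * m = j * m + m := by ring
    by_cases hti : k + j * m = i
    · have hilen : i < new.length := by omega
      rw [pv_getD_set, if_pos ⟨hti, hilen⟩]
      have hik : i - k = j * m := by omega
      have hdv : m ∣ (i - k) := ⟨j, by rw [hik]; ring⟩
      have hq : (i - k) / m = j := by rw [hik]; exact Nat.mul_div_cancel j hm1
      have hA : ¬(k + (j + 1) * m ≤ i ∧ i ≤ nN ∧ m ∣ (i - k)) := by
        rintro ⟨h1, -, -⟩; omega
      unfold pvWj
      rw [if_neg hA, if_pos ⟨by omega, by omega, hdv⟩, hq, hti]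
      ring
    · rw [pv_getD_set, if_neg (fun h => hti h.1)]
      congr 1
      unfold pvWj
      by_cases hd : i ≤ nN ∧ m ∣ (i - k)
      · obtain ⟨hin, c, hc⟩ := hd
        by_cases hj : k + j * m ≤ i
        · have e3 : j * m = m * j := by ring
          have hjc : j ≤ c := Nat.le_of_mul_le_mul_left (by omega : m * j ≤ m * c) hm1
          have hne : j ≠ c := by
            intro he
            apply hti
            have : m * c = j * m := by rw [← he]; ring
            omega
          have e5 : m * (j + 1) ≤ m * c := Nat.mul_le_mul_left m (by omega)
          have e4 : (j + 1) * m = m * (j + 1) := by ring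
          rw [if_pos ⟨by omega, hin, ⟨c, hc⟩⟩, if_pos ⟨hj, hin, ⟨c, hc⟩⟩]
        · rw [if_neg (fun h => hj (by omega : k + j * m ≤ i)), if_neg (fun h => hj h.1)]
      · rw [if_neg (fun h => hd ⟨h.2.1, h.2.2⟩), if_neg (fun h => hd ⟨h.2.1, h.2.2⟩)]
  | case3 new j hm0 hnle =>
    intro hlen
    have h0 : pvWj v m k j i nN = 0 := by
      unfold pvWj
      rw [if_neg (by rintro ⟨h1, h2, -⟩; omega)]
    rw [h0, add_zero]

-- A's fold over source indices k adds the sum of all per-k contributions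
lemma pvAfold (f : Nat → Int) (nN m i : Nat) (hm : m ≠ 0) :
    ∀ (ks : List Nat) (new : List Int), new.length = nN + 1 →
    ((ks.foldl (fun acc k => if f k = 0 then acc else pvAwhile (f k) acc nN m k 0) new).length = nN + 1
     ∧ (ks.foldl (fun acc k => if f k = 0 then acc else pvAwhile (f k) acc nN m k 0) new).getD i 0
       = new.getD i 0 + (ks.map (fun k => pvWj (f k) m k 0 i nN)).sum) := by
  intro ks
  induction ks with
  | nil => intro new hlen; exact ⟨hlen, by simp⟩
  | cons k ks ih =>
    intro new hlen
    simp only [List.foldl_cons, List.map_cons, List.sum_cons]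
    by_cases h0 : f k = 0
    · rw [if_pos h0]
      obtain ⟨hl, hv⟩ := ih new hlen
      refine ⟨hl, ?_⟩
      rw [hv]
      have hz : pvWj (f k) m k 0 i nN = 0 := by
        unfold pvWj; rw [h0]; split_ifs <;> ring
      rw [hz]
      ring
    · rw [if_neg h0]
      obtain ⟨hl, hv⟩ := ih (pvAwhile (f k) new nN m k 0) (by rw [pvAwhile_length]; exact hlen)
      refine ⟨hl, ?_⟩
      rw [hv, pvAwhile_getD _ _ _ _ _ _ _ hm hlen]
      ring

lemma pv_list_finset_sum (g : Nat → Int) (N : Nat) :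
    ((List.range N).map g).sum = ∑ k ∈ Finset.range N, g k := by
  induction N with
  | zero => simp
  | succ n ih =>
    rw [List.range_succ, List.map_append, List.sum_append, Finset.sum_range_succ, ih]
    simp

-- reindex the sum over source positions k to a sum over multiplicities j
lemma pv_ksum (f : Nat → Int) (m i nN : Nat) (hm : 1 ≤ m) (hi : i ≤ nN) :
    ((List.range (nN + 1)).map (fun k => pvWj (f k) m k 0 i nN)).sum
    = ∑ j ∈ Finset.range (i / m + 1), f (i - j * m) * ((j : Int) + 1) := by
  rw [pv_list_finset_sum]
  rw [show (∑ k ∈ Finset.range (nN + 1), pvWj (f k) m k 0 i nN)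
      = ∑ k ∈ Finset.range (nN + 1),
          (if k ≤ i ∧ m ∣ (i - k) then f k * (((i - k) / m : Nat) + 1 : Int) else 0) from
    Finset.sum_congr rfl (fun k _ => by
      unfold pvWj
      by_cases h : k ≤ i ∧ m ∣ (i - k)
      · rw [if_pos ⟨by omega, hi, h.2⟩, if_pos h]
      · rw [if_neg (fun hc => h ⟨by omega, hc.2.2⟩), if_neg h])]
  rw [← Finset.sum_filter]
  refine Finset.sum_bij' (fun k _ => (i - k) / m) (fun j _ => i - j * m) ?_ ?_ ?_ ?_ ?_ <;>
    dsimp only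
  · intro k hk
    rw [Finset.mem_filter, Finset.mem_range] at hk
    rw [Finset.mem_range]
    have := Nat.div_le_div_right (c := m) (Nat.sub_le i k)
    omega
  · intro j hj
    rw [Finset.mem_range] at hj
    rw [Finset.mem_filter, Finset.mem_range]
    have hjm : j * m ≤ i := by
      calc j * m ≤ (i / m) * m := Nat.mul_le_mul_right m (by omega)
        _ ≤ i := Nat.div_mul_le_self i m
    exact ⟨by omega, by omega, ⟨j, by
      have h5 : m * j = j * m := Nat.mul_comm m j
      omega⟩⟩
  · intro k hk
    rw [Finset.mem_filter, Finset.mem_range] at hk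
    have := Nat.div_mul_cancel hk.2.2
    omega
  · intro j hj
    rw [Finset.mem_range] at hj
    have hjm : j * m ≤ i := by
      calc j * m ≤ (i / m) * m := Nat.mul_le_mul_right m (by omega)
        _ ≤ i := Nat.div_mul_le_self i m
    have h1 : i - (i - j * m) = j * m := by omega
    rw [h1]
    exact Nat.mul_div_cancel j (by omega)
  · intro k hk
    rw [Finset.mem_filter, Finset.mem_range] at hk
    have := Nat.div_mul_cancel hk.2.2
    have h2 : i - (i - k) / m * m = k := by omega
    rw [h2]

lemma pv_tsum (f : Nat → Int) (m : Nat) (hm : 1 ≤ m) :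
    ∀ i, (∑ j ∈ Finset.range (i / m + 1), f (i - j * m)) = pvBfun f m i := by
  intro i
  induction i using Nat.strong_induction_on with
  | _ i ih =>
    by_cases hmi : m ≤ i
    · rw [Nat.div_eq_sub_div (by omega) hmi, Finset.sum_range_succ']
      have hsh : ∀ j, i - (j + 1) * m = (i - m) - j * m := by
        intro j
        have : (j + 1) * m = m + j * m := by ring
        omega
      rw [Finset.sum_congr rfl (fun j _ => by rw [hsh j]), ih (i - m) (by omega)]
      conv_rhs => rw [pvBfun]
      rw [dif_pos ⟨by omega, hmi⟩]
      simp only [Nat.zero_mul, Nat.sub_zero]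
      ring
    · rw [Nat.div_eq_of_lt (by omega), Finset.sum_range_one]
      conv_rhs => rw [pvBfun]
      rw [dif_neg (by omega)]
      simp

lemma pv_ssum (f : Nat → Int) (m : Nat) (hm : 1 ≤ m) :
    ∀ i, (∑ j ∈ Finset.range (i / m + 1), f (i - j * m) * ((j : Int) + 1))
      = pvBfun (pvBfun f m) m i := by
  intro i
  induction i using Nat.strong_induction_on with
  | _ i ih =>
    by_cases hmi : m ≤ i
    · rw [Nat.div_eq_sub_div (by omega) hmi, Finset.sum_range_succ']
      have hsh : ∀ j, i - (j + 1) * m = (i - m) - j * m := by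
        intro j
        have : (j + 1) * m = m + j * m := by ring
        omega
      have hcg : ∀ j ∈ Finset.range ((i - m) / m + 1),
          f (i - (j + 1) * m) * ((j : Int) + 1 + 1)
          = f ((i - m) - j * m) * ((j : Int) + 1) + f ((i - m) - j * m) := by
        intro j _
        rw [hsh j]
        ring
      rw [Finset.sum_congr rfl (fun j hj => by push_cast; exact hcg j hj),
        Finset.sum_add_distrib, ih (i - m) (by omega), pv_tsum f m hm (i - m)]
      conv_rhs => rw [pvBfun]
      rw [dif_pos ⟨by omega, hmi⟩]
      conv_rhs => rw [pvBfun]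
      rw [dif_pos ⟨by omega, hmi⟩]
      simp only [Nat.zero_mul, Nat.sub_zero]
      push_cast
      ring
    · rw [Nat.div_eq_of_lt (by omega), Finset.sum_range_one]
      conv_rhs => rw [pvBfun]
      rw [dif_neg (by omega)]
      conv_rhs => rw [pvBfun]
      rw [dif_neg (by omega)]
      simp

-- the per-m steps agree
lemma pv_step_eq (dp : List Int) (nN m : Nat) (hm : 1 ≤ m) (hmn : m ≤ nN)
    (hlen : dp.length = nN + 1) :
    pvAstep dp nN m = pvBpass (pvBpass dp m nN) m nN := by
  have hm0 : m ≠ 0 := by omega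
  obtain ⟨hlen1, hspec1⟩ := pvBpass_spec dp m nN hm hmn hlen
  obtain ⟨hlen2, hspec2⟩ := pvBpass_spec (pvBpass dp m nN) m nN hm hmn hlen1
  have hA := fun i => pvAfold (fun k => dp.getD k 0) nN m i hm0 (List.range (nN + 1))
    (List.replicate (nN + 1) 0) (by simp)
  have lenA : (pvAstep dp nN m).length = nN + 1 := (hA 0).1
  apply List.ext_getElem (by rw [lenA, hlen2])
  intro idx h1 h2
  have hidx : idx ≤ nN := by rw [lenA] at h1; omega
  rw [← List.getD_eq_getElem _ 0 h1, ← List.getD_eq_getElem _ 0 h2]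
  have hAval : (pvAstep dp nN m).getD idx 0
      = pvBfun (pvBfun (fun j => dp.getD j 0) m) m idx := by
    unfold pvAstep
    rw [(hA idx).2]
    rw [pv_ksum (fun k => dp.getD k 0) m idx nN hm hidx,
      pv_ssum (fun k => dp.getD k 0) m hm idx]
    simp
  rw [hAval, hspec2 idx hidx]
  exact (pvBfun_congr _ _ m idx (fun j hj => hspec1 j (le_trans hj hidx))).symm

lemma pv_outer_eq (nN : Nat) :
    ∀ (ms : List Nat) (l : List Int), (∀ m ∈ ms, 1 ≤ m ∧ m ≤ nN) → l.length = nN + 1 →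
    ms.foldl (fun dp m => pvAstep dp nN m) l
      = ms.foldl (fun dp m => pvBpass (pvBpass dp m nN) m nN) l := by
  intro ms
  induction ms with
  | nil => intro l _ _; rfl
  | cons m ms ih =>
    intro l hms hlen
    obtain ⟨hm1, hmn⟩ := hms m List.mem_cons_self
    simp only [List.foldl_cons]
    rw [← pv_step_eq l nN m hm1 hmn hlen]
    exact ih _ (fun m' hm' => hms m' (List.mem_cons_of_mem _ hm'))
      ((pvAfold (fun k => l.getD k 0) nN m 0 (by omega) (List.range (nN + 1))
        (List.replicate (nN + 1) 0) (by simp)).1)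

-- ===== VERDICT (by name: the statement is the Claim_ definition above) =====
theorem betagamma_hilbert_spec : Claim_equal_betagamma_hilbert := by
  intro n _
  unfold Spec_betagamma_hilbert betagamma_hilbert betagamma_hilbert_alt
  by_cases hneg : n < 0
  · rw [if_pos hneg, if_pos hneg]
  · rw [if_neg hneg, if_neg hneg]
    by_cases h0 : n = 0
    · subst h0
      simp
    · rw [if_neg h0]
      have hpos : 1 ≤ n.toNat := by omega
      obtain ⟨nm, hnm⟩ : ∃ nm, n.toNat = nm + 1 := ⟨n.toNat - 1, by omega⟩
      have hinit : ((List.replicate (n.toNat + 1) (0 : Int)).set 0 1)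
          = 1 :: List.replicate n.toNat 0 := by
        rw [hnm, List.replicate_succ]
        rfl
      rw [hinit, pv_outer_eq n.toNat (List.range' 1 n.toNat)
        (1 :: List.replicate n.toNat 0)
        (fun m hmm => by
          rw [List.mem_range'] at hmm
          obtain ⟨idx, hidx, rfl⟩ := hmm
          omega)
        (by simp)]
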